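-- pv_equiv track=rewrite | github.com/wattyven/AoCSolutions | 2016/Day 06/Day 06.py | leastCommonChar
-- ===== SOURCE A (Python) =====
-- def leastCommonChar(string):
--     '''finds the least common character in a string'''
--     chars = []
--     for char in string:
--         if char not in chars:
--             chars.append(char)
--     charcounts = []
--     for char in chars:
--         charcounts.append(string.count(char))
--     return(chars[charcounts.index(min(charcounts))])
-- ===== SOURCE B (Python) =====
-- def leastCommonChar(string):
--     '''finds the least common character in a string'''
--     counts = {}
--     for char in string:
--         counts[char] = counts.get(char, 0) + 1
--     return sorted(counts, key=counts.get)[0]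
-- ===== Notes on version B (the rewrite author's own statement) =====
-- stated objective: alternative
-- what changed: A rescans the whole string with string.count for every distinct character and then does min plus list.index over the count list; B builds a frequency dict in one pass and stably sorts the distinct characters (dict keys, first-appearance order) by count, returning the head, which preserves A's first-appearance tie-break.
import Mathlib
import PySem

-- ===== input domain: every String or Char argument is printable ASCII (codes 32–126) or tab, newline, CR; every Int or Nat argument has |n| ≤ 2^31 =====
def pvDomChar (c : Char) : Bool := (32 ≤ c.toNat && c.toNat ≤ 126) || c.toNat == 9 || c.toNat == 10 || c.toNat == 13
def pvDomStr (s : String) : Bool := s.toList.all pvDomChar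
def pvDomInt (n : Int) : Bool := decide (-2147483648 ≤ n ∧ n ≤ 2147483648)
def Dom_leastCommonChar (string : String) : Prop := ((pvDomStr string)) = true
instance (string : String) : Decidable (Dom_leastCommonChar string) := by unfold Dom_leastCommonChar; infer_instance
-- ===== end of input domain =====

-- B replaces A's per-character rescans of the string (string.count for every distinct
-- character, then min + .index) by one frequency dict built in a single pass and a stable
-- sort of the distinct characters by count (objective: alternative decomposition).

-- ===== PORT A =====
def leastCommonChar (string : String) : String :=
  let chars : List Char :=
    string.toList.foldl (fun acc char => if acc.contains char then acc else acc ++ [char]) []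
  let charcounts : List Nat :=
    chars.map (fun char => PySem.Str.count string (String.ofList [char]))
  match PySem.List.min? charcounts (fun x => x) with
  | none => ""   -- min([]) raises ValueError: excluded by Pre_
  | some m =>
    match PySem.List.index? charcounts m with
    | none => ""  -- unreachable: m ∈ charcounts
    | some i => ((chars[i]?).map (fun c => String.ofList [c])).getD ""

-- ===== PORT B =====
def leastCommonChar_alt (string : String) : String :=
  let counts : PySem.Dict Char Int :=
    string.toList.foldl (fun d char => d.insert char (d.getD char 0 + 1)) PySem.Dict.empty
  match PySem.List.sorted counts.keys (fun c => counts.getD c 0) false with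
  | [] => ""     -- sorted(counts)[0] raises IndexError: excluded by Pre_
  | c :: _ => String.ofList [c]

-- ===== PRECONDITION & SPEC =====
-- Pre_ excludes only the empty string, on which A raises ValueError (min of an empty list).
def Pre_leastCommonChar (string : String) : Prop := string.toList ≠ []
instance (string : String) : Decidable (Pre_leastCommonChar string) := by unfold Pre_leastCommonChar; infer_instance
def pvWitness_leastCommonChar : String := "ab"

def Spec_leastCommonChar (string : String) (out : String) : Prop := out = leastCommonChar_alt string
instance (string : String) (out : String) : Decidable (Spec_leastCommonChar string out) := by unfold Spec_leastCommonChar; infer_instance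

-- ===== CLAIM (what is proved, stated in full; the proofs are below) =====
def Claim_equal_leastCommonChar : Prop := ∀ (string : String), Dom_leastCommonChar string → Pre_leastCommonChar string → Spec_leastCommonChar string (leastCommonChar string)

-- ===== LEMMAS AND PROOFS =====

-- the one-step accumulator of Python's min (first minimal element)
def pvStep {α κ : Type} [LT κ] [DecidableLT κ] (key : α → κ) (o : Option α) (x : α) : Option α :=
  match o with
  | none => some x
  | some m => if key x < key m then some x else some m

theorem pvMin?_eq_foldl {α κ : Type} [LT κ] [DecidableLT κ] (key : α → κ) (xs : List α) :
    PySem.List.min? xs key = xs.foldl (pvStep key) none := rfl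

theorem pvHead_insertBy {α κ : Type} [LT κ] [DecidableLT κ] (key : α → κ) (x : α) (acc : List α) :
    (PySem.List.insertBy (fun a b => decide (key a < key b)) x acc).head? = pvStep key acc.head? x := by
  cases acc with
  | nil => simp [PySem.List.insertBy, pvStep]
  | cons y ys =>
    simp only [PySem.List.insertBy, pvStep, List.head?]
    split_ifs with h h' h' <;> simp_all

theorem pvHead_foldl_insertBy {α κ : Type} [LT κ] [DecidableLT κ] (key : α → κ) :
    ∀ (xs acc : List α),
      (xs.foldl (fun a x => PySem.List.insertBy (fun a b => decide (key a < key b)) x a) acc).head?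
        = xs.foldl (pvStep key) acc.head?
  | [], _ => rfl
  | x :: xs, acc => by
    simp only [List.foldl_cons]
    rw [pvHead_foldl_insertBy key xs, pvHead_insertBy]

-- the head of Python's stable sort is Python's min (the first minimal element)
theorem pvSorted_head {α κ : Type} [LT κ] [DecidableLT κ] (key : α → κ) (xs : List α) :
    (PySem.List.sorted xs key false).head? = PySem.List.min? xs key := by
  rw [PySem.List.sorted_eq_foldl_insertBy, pvHead_foldl_insertBy key xs []]
  rfl

-- first-minimality of the min fold: the result sits at an index before which every key is strictly larger
theorem pvFoldlMin_first {α κ : Type} [LinearOrder κ] (key : α → κ) :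
    ∀ (t : List α) (m : α), ∃ a i,
      t.foldl (pvStep key) (some m) = some a ∧ key a ≤ key m ∧
      (m :: t)[i]? = some a ∧ ∀ y ∈ (m :: t).take i, key a < key y
  | [], m => ⟨m, 0, rfl, le_refl _, rfl, by simp⟩
  | x :: t, m => by
    by_cases hx : key x < key m
    · obtain ⟨a, i, h1, h2, h4, h5⟩ := pvFoldlMin_first key t x
      refine ⟨a, i + 1, ?_, ?_, ?_, ?_⟩
      · simpa [pvStep, hx] using h1
      · exact le_of_lt (lt_of_le_of_lt h2 hx)
      · simpa using h4
      · intro y hy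
        rcases List.mem_cons.mp (by simpa [List.take_succ_cons] using hy) with h | h
        · subst h; exact lt_of_le_of_lt h2 hx
        · exact h5 y h
    · obtain ⟨a, i, h1, h2, h4, h5⟩ := pvFoldlMin_first key t m
      have hml : key m ≤ key x := le_of_not_gt hx
      cases i with
      | zero =>
        have ha : m = a := by simpa using h4
        refine ⟨a, 0, ?_, h2, by simp [← ha], by simp⟩
        simpa [pvStep, hx] using h1
      | succ j =>
        have h4' : t[j]? = some a := by simpa using h4
        have h5' : ∀ y ∈ m :: t.take j, key a < key y := by
          intro y hy'; exact h5 y (by simpa [List.take_succ_cons] using hy')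
        have ham : key a < key m := h5' m (List.mem_cons_self ..)
        refine ⟨a, j + 2, ?_, h2, by simpa using h4', ?_⟩
        · simpa [pvStep, hx] using h1
        · intro y hy
          rcases (by simpa [List.take_succ_cons] using hy : y = m ∨ y = x ∨ y ∈ t.take j) with h | h | h
          · subst h; exact ham
          · subst h; exact lt_of_lt_of_le ham hml
          · exact h5' y (List.mem_cons_of_mem _ h)

-- Python's min returns the FIRST minimal element
theorem pvMin?_first {α κ : Type} [LinearOrder κ] (key : α → κ) (xs : List α) (a : α)
    (h : PySem.List.min? xs key = some a) :
    ∃ i, xs[i]? = some a ∧ (∀ y ∈ xs.take i, key a < key y) ∧ ∀ y ∈ xs, key a ≤ key y := by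
  cases xs with
  | nil => simp [PySem.List.min?] at h
  | cons m t =>
    obtain ⟨a', i, h1, _, h4, h5⟩ := pvFoldlMin_first key t m
    have h1' : PySem.List.min? (m :: t) key = some a' := h1
    obtain rfl : a' = a := Option.some_injective _ (h1'.symm.trans h)
    exact ⟨i, h4, h5, PySem.List.min?_isMin h⟩

-- an element that is minimal and strictly below everything before it is unique
theorem pvFirstMin_unique {α κ : Type} [LinearOrder κ] (key : α → κ) (D : List α) (a b : α)
    (i j : Nat) (hia : D[i]? = some a) (hjb : D[j]? = some b)
    (hta : ∀ y ∈ D.take i, key a < key y) (htb : ∀ y ∈ D.take j, key b < key y)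
    (hga : ∀ y ∈ D, key a ≤ key y) (hgb : ∀ y ∈ D, key b ≤ key y) : a = b := by
  rcases lt_trichotomy i j with hij | hij | hij
  · exfalso
    have hmem : a ∈ D.take j := by
      have h' : (D.take j)[i]? = some a := by rw [List.getElem?_take_of_lt hij]; exact hia
      exact List.mem_of_getElem? h'
    exact absurd (htb a hmem) (not_lt.mpr (hga b (List.mem_of_getElem? hjb)))
  · subst hij
    exact Option.some_injective _ (hia.symm.trans hjb)
  · exfalso
    have hmem : b ∈ D.take i := by
      have h' : (D.take i)[j]? = some b := by rw [List.getElem?_take_of_lt hij]; exact hjb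
      exact List.mem_of_getElem? h'
    exact absurd (hta b hmem) (not_lt.mpr (hgb a (List.mem_of_getElem? hia)))

-- min over the mapped count list (A's list) is the image of min with a key
theorem pvFoldl_map {α κ : Type} [LinearOrder κ] (f : α → κ) :
    ∀ (D : List α) (o : Option α),
      (D.map f).foldl (pvStep (fun x => x)) (o.map f) = Option.map f (D.foldl (pvStep f) o)
  | [], _ => rfl
  | x :: D, o => by
    have hstep : pvStep (fun x => x) (o.map f) (f x) = Option.map f (pvStep f o x) := by
      cases o with
      | none => rfl
      | some m => simp only [pvStep, Option.map_some]; split <;> simp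
    simp only [List.map_cons, List.foldl_cons, hstep]
    exact pvFoldl_map f D _

theorem pvMin?_map {α κ : Type} [LinearOrder κ] (f : α → κ) (D : List α) :
    PySem.List.min? (D.map f) (fun x => x) = Option.map f (PySem.List.min? D f) := by
  rw [pvMin?_eq_foldl, pvMin?_eq_foldl]
  exact pvFoldl_map f D none

-- string.count of a single character is List.count
theorem pvCountGo_singleton (c : Char) :
    ∀ (l : List Char) (fuel acc : Nat), l.length ≤ fuel →
      PySem.Chars.count.go [c] fuel l acc = acc + l.count c
  | [], fuel, acc, _ => by cases fuel <;> simp [PySem.Chars.count.go]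
  | h :: t, fuel, acc, hle => by
    cases fuel with
    | zero => simp at hle
    | succ f =>
      have ht : t.length ≤ f := by simpa using hle
      by_cases hc : c = h
      · subst hc
        rw [PySem.Chars.count.go]
        simp only [List.isPrefixOf, BEq.rfl, Bool.true_and, if_true]
        rw [show ([c].length) = 1 from rfl]
        simp only [List.drop_succ_cons, List.drop_zero]
        rw [pvCountGo_singleton c t f (acc + 1) ht]
        simp
        omega
      · rw [PySem.Chars.count.go]
        have hpf : [c].isPrefixOf (h :: t) = false := by
          simpa [List.isPrefixOf] using hc
        rw [hpf]
        simp only [Bool.false_eq_true, if_false]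
        rw [pvCountGo_singleton c t f acc ht]
        have hhc : (h == c) = false := by
          simpa using fun h' => hc h'.symm
        simp [List.count_cons, hhc]

theorem pvCount_singleton (cs : List Char) (c : Char) :
    PySem.Chars.count cs [c] = cs.count c := by
  rw [PySem.Chars.count]
  simp only [List.isEmpty_cons, Bool.false_eq_true, if_false]
  simpa using pvCountGo_singleton c cs cs.length 0 (le_refl _)

-- A's dedup loop is PySem.Set.ofList
theorem pvChars_eq (cs : List Char) :
    cs.foldl (fun acc char => if acc.contains char then acc else acc ++ [char]) []
      = PySem.Set.ofList cs := rfl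

-- B's dict keys are the distinct characters in first-appearance order
theorem pvKeys_eq (cs : List Char) :
    (cs.foldl (fun d char => d.insert char (d.getD char 0 + 1)) (PySem.Dict.empty : PySem.Dict Char Int)).keys
      = PySem.Set.ofList cs := by
  rw [PySem.Dict.keys_foldl_insert cs (fun d x => d.getD x 0 + 1) PySem.Dict.empty]
  rfl

-- B's dict counts occurrences
theorem pvCounts_eq (cs : List Char) (c : Char) :
    (cs.foldl (fun d char => d.insert char (d.getD char 0 + 1)) (PySem.Dict.empty : PySem.Dict Char Int)).getD c 0
      = (cs.count c : Int) := by
  rw [PySem.Dict.getD_foldl_insert_add_one cs PySem.Dict.empty c]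
  simp [PySem.Dict.getD_empty]

-- the core identity, on the distinct-character list D and the count key f
theorem pvMain {f : Char → Nat} (D : List Char) (hDne : D ≠ []) :
    (match PySem.List.min? (D.map f) (fun x => x) with
     | none => ""
     | some m =>
       match PySem.List.index? (D.map f) m with
       | none => ""
       | some i => ((D[i]?).map (fun c => String.ofList [c])).getD "")
    = (match PySem.List.sorted D (fun c => ((f c : Int))) false with
       | [] => ""
       | c :: _ => String.ofList [c]) := by
  -- A's min over the count list
  obtain ⟨a, ha⟩ : ∃ a, PySem.List.min? D f = some a := by
    cases h : PySem.List.min? D f with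
    | none => exact absurd ((PySem.List.min?_eq_none_iff D f).mp h) hDne
    | some a => exact ⟨a, rfl⟩
  have hminmap : PySem.List.min? (D.map f) (fun x => x) = some (f a) := by
    rw [pvMin?_map f D, ha]; rfl
  -- A's index of the min
  have hfa_mem : f a ∈ D.map f := List.mem_map_of_mem (PySem.List.min?_mem ha)
  obtain ⟨i, hi⟩ : ∃ i, PySem.List.index? (D.map f) (f a) = some i := by
    cases h : PySem.List.index? (D.map f) (f a) with
    | none => exact absurd ((PySem.List.index?_eq_none_iff _ _).mp h) (by simpa using hfa_mem)
    | some i => exact ⟨i, rfl⟩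
  obtain ⟨hilt, hieq, hipre⟩ := PySem.List.getElem_of_index?_eq_some hi
  have hilen : i < D.length := by simpa using hilt
  have hfi : f (D[i]'hilen) = f a := by
    rw [← hieq]; exact (List.getElem_map f).symm
  -- A's chosen element D[i] is a first minimum of f over D
  have hmin := PySem.List.min?_isMin hminmap
  have hAglobal : ∀ y ∈ D, f (D[i]'hilen) ≤ f y := by
    intro y hy
    rw [hfi]; exact hmin (f y) (List.mem_map_of_mem hy)
  have hAfirst : ∀ y ∈ D.take i, f (D[i]'hilen) < f y := by
    intro y hy
    obtain ⟨j, hjlt, hjy⟩ := List.getElem_of_mem hy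
    have hjlen : j < i := lt_of_lt_of_le hjlt (by simp [List.length_take])
    have hjD : j < D.length := lt_trans hjlen hilen
    have hyD : y = D[j]'hjD := by rw [← hjy]; exact List.getElem_take
    have hne : f (D[j]'hjD) ≠ f a := by
      have h' := hipre j (by simpa using hjlen)
      simpa [List.getElem_map] using h'
    have hle : f a ≤ f (D[j]'hjD) := hmin _ (List.mem_map_of_mem (List.getElem_mem _))
    rw [hyD, hfi]
    exact lt_of_le_of_ne hle (fun h => hne h.symm)
  -- B's head of the sorted keys
  cases hS : PySem.List.sorted D (fun c => ((f c : Int))) false with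
  | nil => exact absurd ((PySem.List.sorted_eq_nil_iff ..).mp hS) hDne
  | cons b rest =>
    have hb : PySem.List.min? D (fun c => ((f c : Int))) = some b := by
      rw [← pvSorted_head (fun c => ((f c : Int))) D, hS]; rfl
    obtain ⟨j, hjb, hjpre, hjglobal⟩ := pvMin?_first (fun c => ((f c : Int))) D b hb
    have hBfirst : ∀ y ∈ D.take j, f b < f y := by
      intro y hy; exact_mod_cast hjpre y hy
    have hBglobal : ∀ y ∈ D, f b ≤ f y := by
      intro y hy; exact_mod_cast hjglobal y hy
    have hab : D[i]'hilen = b :=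
      pvFirstMin_unique f D (D[i]'hilen) b i j (List.getElem?_eq_getElem hilen) hjb
        hAfirst hBfirst hAglobal hBglobal
    have hi' : List.idxOf? (f a) (List.map f D) = some i := by simpa using hi
    simp [hminmap, hi', List.getElem?_eq_getElem hilen, hab]

-- ===== VERDICT (by name: the statement is the Claim_ definition above) =====
theorem leastCommonChar_spec : Claim_equal_leastCommonChar := by
  intro string _ hpre
  unfold Spec_leastCommonChar leastCommonChar leastCommonChar_alt
  have hpre' : string.toList ≠ [] := hpre
  have hDne : PySem.Set.ofList string.toList ≠ [] := by
    obtain ⟨x, hx⟩ := List.exists_mem_of_ne_nil _ hpre'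
    exact List.ne_nil_of_mem ((PySem.Set.mem_ofList _ x).mpr hx)
  have hcc : (fun char => PySem.Str.count string (String.ofList [char]))
      = (fun c => string.toList.count c) := by
    funext c
    show PySem.Chars.count string.toList (String.ofList [c]).toList = string.toList.count c
    rw [show (String.ofList [c]).toList = [c] by simp]
    exact pvCount_singleton string.toList c
  have hkeyB : (fun c => (string.toList.foldl (fun d char => d.insert char (d.getD char 0 + 1))
        (PySem.Dict.empty : PySem.Dict Char Int)).getD c 0)
      = (fun c => ((string.toList.count c : Int))) := by
    funext c; exact pvCounts_eq string.toList c
  simp only [pvChars_eq, pvKeys_eq, hcc, hkeyB]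
  exact pvMain (f := fun c => string.toList.count c) _ hDne
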